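-- pv_equiv track=rewrite | github.com/adhilaaboobakar/python_programs | interview_works/vowel_swap.py | vowel_swap
-- ===== SOURCE A (Python) =====
-- def vowel_swap(text):
--
--     vowels="aeiou"
--     result=""
--     for ch in text:
--         if ch in vowels:
--             if ch=="u":
--                 result+="a"
--             else:
--                 result+=vowels[vowels.index(ch)+1]
--
--         else:
--             result+=ch
--
--     return result
-- ===== SOURCE B (Python) =====
-- def vowel_swap(text):
--     # Staged whole-string substitution passes: break the a->e->i->o->u->a cycle
--     # with a sentinel (NUL never occurs in the printable-ASCII domain).
--     for old, new in (("u", "\x00"), ("o", "u"), ("i", "o"), ("e", "i"), ("a", "e"), ("\x00", "a")):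
--         text = text.replace(old, new)
--     return text
-- ===== Notes on version B (the rewrite author's own statement) =====
-- stated objective: faster
-- what changed: Replaces the single per-character loop (membership test, index lookup, string concatenation) by six staged whole-string replace passes that unroll the vowel cycle through a sentinel character.
import Mathlib
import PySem

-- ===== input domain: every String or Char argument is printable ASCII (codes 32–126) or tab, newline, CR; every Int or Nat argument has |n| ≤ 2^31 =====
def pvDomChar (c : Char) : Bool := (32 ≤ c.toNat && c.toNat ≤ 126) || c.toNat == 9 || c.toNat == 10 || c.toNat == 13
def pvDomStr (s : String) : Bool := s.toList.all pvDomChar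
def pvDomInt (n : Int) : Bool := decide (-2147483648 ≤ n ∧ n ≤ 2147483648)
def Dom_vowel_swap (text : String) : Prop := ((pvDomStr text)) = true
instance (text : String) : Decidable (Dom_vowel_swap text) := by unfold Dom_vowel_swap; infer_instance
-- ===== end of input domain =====

-- B replaces A's per-character loop by six staged whole-string replace passes unrolling the
-- vowel cycle through a sentinel '\x00' (which the stated domain excludes from the input).

-- ===== PORT A =====
-- one loop iteration's appended piece (the body of A's for-loop)
def vowel_swap_piece (ch : Char) : String :=
  let vowels := "aeiou".toList
  if vowels.contains ch then
    if ch == 'u' then "a"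
    -- vowels[vowels.index(ch)+1]; the guard makes the lookup in range, getD defaults unreachable
    else String.ofList [(PySem.List.pyGet? vowels (((PySem.List.index? vowels ch).getD 0 : Nat) + 1)).getD ' ']
  else String.ofList [ch]

def vowel_swap (text : String) : String :=
  text.toList.foldl (fun result ch => result ++ vowel_swap_piece ch) ""

-- ===== PORT B =====
-- the staged replacement schedule: u→NUL, o→u, i→o, e→i, a→e, NUL→a
def vowel_swap_stages : List (String × String) :=
  [("u", "\x00"), ("o", "u"), ("i", "o"), ("e", "i"), ("a", "e"), ("\x00", "a")]

def vowel_swap_alt (text : String) : String :=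
  vowel_swap_stages.foldl (fun s p => PySem.Str.replace s p.1 p.2) text

-- ===== PRECONDITION & SPEC =====
def Spec_vowel_swap (text : String) (out : String) : Prop := out = vowel_swap_alt text
instance (text : String) (out : String) : Decidable (Spec_vowel_swap text out) := by unfold Spec_vowel_swap; infer_instance

-- ===== CLAIM (what is proved, stated in full; the proofs are below) =====
def Claim_equal_vowel_swap : Prop := ∀ (text : String), Dom_vowel_swap text → Spec_vowel_swap text (vowel_swap text)

-- ===== LEMMAS AND PROOFS =====

-- A's per-character mapping
def trA (c : Char) : Char :=
  if c = 'a' then 'e' else if c = 'e' then 'i' else if c = 'i' then 'o'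
  else if c = 'o' then 'u' else if c = 'u' then 'a' else c

theorem piece_eq (c : Char) : vowel_swap_piece c = String.ofList [trA c] := by
  by_cases hc : c ∈ "aeiou".toList
  · fin_cases hc <;> decide
  · have hm := hc
    simp only [show "aeiou".toList = ['a','e','i','o','u'] from rfl, List.mem_cons,
      List.not_mem_nil, or_false, not_or] at hm
    obtain ⟨h1, h2, h3, h4, h5⟩ := hm
    simp only [vowel_swap_piece]
    rw [if_neg (by simpa using hc)]
    simp [trA, h1, h2, h3, h4, h5]

theorem foldA_eq (l : List Char) (acc : String) :
    l.foldl (fun r c => r ++ vowel_swap_piece c) acc = acc ++ String.ofList (l.map trA) := by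
  induction l generalizing acc with
  | nil => apply String.ext; simp
  | cons c cs ih =>
    simp only [List.foldl_cons]
    rw [ih, piece_eq, String.append_assoc, ← String.ofList_append]
    simp

-- a single-character replace is a per-character map
theorem replace_go_single (x y : Char) :
    ∀ (fuel : Nat) (l acc : List Char), l.length ≤ fuel →
    PySem.Chars.replace.go [x] [y] fuel l acc
      = acc.reverse ++ l.map (fun c => if c = x then y else c) := by
  intro fuel
  induction fuel with
  | zero =>
    intro l acc h
    have : l = [] := List.eq_nil_of_length_eq_zero (Nat.le_zero.mp h)
    subst this; simp [PySem.Chars.replace.go]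
  | succ n ih =>
    intro l acc h
    cases l with
    | nil => simp [PySem.Chars.replace.go]
    | cons c t =>
      simp only [PySem.Chars.replace.go]
      by_cases hcx : c = x
      · rw [if_pos (by simp [hcx, List.isPrefixOf])]
        simp only [List.length_cons, List.drop_succ_cons, List.length_nil, List.drop_zero]
        rw [ih t _ (by simpa using Nat.lt_succ_iff.mp (by simpa using h))]
        simp [hcx]
      · rw [if_neg (by simp [List.isPrefixOf, Ne.symm hcx])]
        rw [ih t _ (by simpa using Nat.lt_succ_iff.mp (by simpa using h))]
        simp [hcx]

theorem replace_single (x y : Char) (l : List Char) :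
    PySem.Chars.replace l [x] [y] = l.map (fun c => if c = x then y else c) := by
  simp only [PySem.Chars.replace, List.isEmpty_cons, Bool.false_eq_true, if_false]
  simpa using replace_go_single x y l.length l [] le_rfl

theorem str_replace_single (x y : Char) (s : String) :
    PySem.Str.replace s (String.ofList [x]) (String.ofList [y])
      = String.ofList (s.toList.map (fun c => if c = x then y else c)) := by
  simp [PySem.Str.replace, replace_single]

-- ===== VERDICT (by name: the statement is the Claim_ definition above) =====
theorem vowel_swap_spec : Claim_equal_vowel_swap := by
  intro text hdom
  unfold Spec_vowel_swap vowel_swap vowel_swap_alt vowel_swap_stages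
  rw [foldA_eq]
  simp only [List.foldl_cons, List.foldl_nil]
  rw [show ("u" : String) = String.ofList ['u'] from rfl]
  rw [show ("\x00" : String) = String.ofList ['\x00'] from rfl]
  rw [show ("o" : String) = String.ofList ['o'] from rfl]
  rw [show ("i" : String) = String.ofList ['i'] from rfl]
  rw [show ("e" : String) = String.ofList ['e'] from rfl]
  rw [show ("a" : String) = String.ofList ['a'] from rfl]
  rw [str_replace_single, str_replace_single, str_replace_single, str_replace_single,
      str_replace_single, str_replace_single]
  simp only [String.toList_ofList, List.map_map]
  apply String.ext
  simp only [String.toList_ofList, String.toList_append, String.toList_empty,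
    List.nil_append]
  apply List.map_congr_left
  intro c hc
  have hdc : pvDomChar c = true := by
    have := (List.all_eq_true.mp hdom) c hc
    simpa using this
  have hnz : c ≠ '\x00' := by
    intro h; subst h; simp [pvDomChar] at hdc
  simp only [Function.comp]
  by_cases h1 : c = 'a'; · subst h1; decide
  by_cases h2 : c = 'e'; · subst h2; decide
  by_cases h3 : c = 'i'; · subst h3; decide
  by_cases h4 : c = 'o'; · subst h4; decide
  by_cases h5 : c = 'u'; · subst h5; decide
  simp [trA, h1, h2, h3, h4, h5, hnz]
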